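-- pv_equiv track=rewrite | github.com/BrendonShi/Projects | Algorithms and Data Structures Coursework (Code) - Python/optimised_solution.py | extract_binary_substrings
-- ===== SOURCE A (Python) =====
-- def extract_binary_substrings(binary_string):
--     """ extracts all possible decimal values from given binary substrings """
--     if any(c not in '01' for c in binary_string):  # checks if the string contains only '0' or '1'
--         return None
--
--     substrings = set()  # store decimal values
--     length = len(binary_string)
--     for i in range(length):
--         decimal = 0  # Decimal equivalent
--         for j in range(i, length):
--             # converting binary -> decimal
--             decimal = (decimal << 1) | int(binary_string[j])  # binary-to-decimal conversion by moving bits to the left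
--             substrings.add(decimal)  # adding the decimal value to the set
--     return substrings
-- ===== SOURCE B (Python) =====
-- def extract_binary_substrings(binary_string):
--     """ extracts all possible decimal values from given binary substrings """
--     if any(c not in '01' for c in binary_string):
--         return None
--
--     # prefix[k] = integer value of the first k characters, built in one linear pass
--     prefix = [0]
--     for c in binary_string:
--         prefix.append((prefix[-1] << 1) | int(c))
--
--     n = len(binary_string)
--     result = set()
--     for i in range(n):
--         for j in range(i + 1, n + 1):
--             # value of binary_string[i:j] by prefix difference
--             result.add(prefix[j] - prefix[i] * (2 ** (j - i)))
--     return result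
-- ===== Notes on version B (the rewrite author's own statement) =====
-- stated objective: alternative
-- what changed: B precomputes a prefix-value table in one linear pass and obtains each substring's value by the closed-form difference prefix[j] - prefix[i]*2**(j-i), instead of A's in-place running shift-or accumulator inside the inner loop.
import Mathlib
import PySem

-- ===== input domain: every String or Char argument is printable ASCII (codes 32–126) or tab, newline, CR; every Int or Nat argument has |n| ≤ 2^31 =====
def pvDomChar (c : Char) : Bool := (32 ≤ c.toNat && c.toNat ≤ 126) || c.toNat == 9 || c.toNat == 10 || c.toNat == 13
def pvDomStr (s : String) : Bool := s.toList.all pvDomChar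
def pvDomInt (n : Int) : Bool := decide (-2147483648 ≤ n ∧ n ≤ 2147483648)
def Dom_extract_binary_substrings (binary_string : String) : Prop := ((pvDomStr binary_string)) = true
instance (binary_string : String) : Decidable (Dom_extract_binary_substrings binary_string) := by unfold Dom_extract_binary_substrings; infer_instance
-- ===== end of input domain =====

-- B replaces A's running shift-or accumulator by a linear prefix-value table and a
-- closed-form prefix difference per substring (objective: alternative decomposition).

-- int(c) for c ∈ {'0','1'} (the only characters reaching it, thanks to the guard)
def pvDigit (c : Char) : Int := if c = '1' then 1 else 0

-- ===== PORT A =====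
def extract_binary_substrings (binary_string : String) : Option (List Int) :=
  let cs := binary_string.toList
  if cs.any (fun c => decide (¬ (c = '0' ∨ c = '1'))) then none
  else
    let n := cs.length
    some ((List.range n).foldl (fun (subs : PySem.Set Int) i =>
      ((List.range' i (n - i)).foldl
        (fun (st : Int × PySem.Set Int) j =>
          -- (decimal << 1) | int(cs[j]); exact since decimal ≥ 0 and the bit is 0/1;
          -- j < n always, so getD is cs[j]
          let d : Int := 2 * st.1 + pvDigit (cs.getD j '0')
          (d, st.2.add d))
        ((0 : Int), subs)).2)
      PySem.Set.empty)

-- ===== PORT B =====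
def extract_binary_substrings_alt (binary_string : String) : Option (List Int) :=
  let cs := binary_string.toList
  if cs.any (fun c => decide (¬ (c = '0' ∨ c = '1'))) then none
  else
    -- prefix[-1] is getLast; (x << 1) | bit = 2*x + bit (x ≥ 0)
    let pfx := cs.foldl (fun (p : List Int) c => p ++ [2 * (p.getLast?.getD 0) + pvDigit c]) [0]
    let n := cs.length
    some ((List.range n).foldl (fun (result : PySem.Set Int) i =>
      (List.range' (i + 1) (n - i)).foldl
        -- indices i < j ≤ n are always in range for prefix (length n+1), so getD is prefix[j]
        (fun (r : PySem.Set Int) j => PySem.Set.add r (pfx.getD j 0 - pfx.getD i 0 * 2 ^ (j - i)))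
        result)
      PySem.Set.empty)

-- ===== PRECONDITION & SPEC =====
def Spec_extract_binary_substrings (binary_string : String) (out : Option (List Int)) : Prop := out = extract_binary_substrings_alt binary_string
instance (binary_string : String) (out : Option (List Int)) : Decidable (Spec_extract_binary_substrings binary_string out) := by unfold Spec_extract_binary_substrings; infer_instance

-- ===== CLAIM (what is proved, stated in full; the proofs are below) =====
def Claim_equal_extract_binary_substrings : Prop := ∀ (binary_string : String), Dom_extract_binary_substrings binary_string → Spec_extract_binary_substrings binary_string (extract_binary_substrings binary_string)

-- ===== LEMMAS AND PROOFS =====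

-- value of a prefix of the character list, continuing from accumulator a
def pvPrefA (a : Int) (l : List Char) : Int := l.foldl (fun a c => 2 * a + pvDigit c) a

-- the tail of B's prefix list, as a recursive function
def pvHl (a : Int) : List Char → List Int
  | [] => []
  | c :: l => (2 * a + pvDigit c) :: pvHl (2 * a + pvDigit c) l

lemma pvPrefA_cons (a : Int) (c : Char) (l : List Char) :
    pvPrefA a (c :: l) = pvPrefA (2 * a + pvDigit c) l := rfl

lemma pvFoldl_prefix_eq (l : List Char) : ∀ (p : List Int) (a : Int),
    p.getLast?.getD 0 = a →
    l.foldl (fun (p : List Int) c => p ++ [2 * (p.getLast?.getD 0) + pvDigit c]) p = p ++ pvHl a l := by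
  induction l with
  | nil => intro p a _; simp [pvHl]
  | cons c l ih =>
      intro p a h
      have h2 : (p ++ [2 * a + pvDigit c]).getLast?.getD 0 = 2 * a + pvDigit c := by
        simp
      simp only [List.foldl_cons, h, pvHl]
      rw [ih (p ++ [2 * a + pvDigit c]) (2 * a + pvDigit c) h2]
      simp

lemma pvHl_getD (l : List Char) : ∀ (a : Int) (k : Nat), k < l.length →
    (pvHl a l).getD k 0 = pvPrefA a (l.take (k + 1)) := by
  induction l with
  | nil => intro a k h; simp at h
  | cons c l ih =>
      intro a k h
      cases k with
      | zero => simp [pvHl, pvPrefA]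
      | succ k =>
          simp only [pvHl, List.getD_cons_succ, List.take_succ_cons, pvPrefA_cons]
          exact ih _ k (by simpa using h)

-- B's prefix list entry j is the value of the first j characters
lemma pvPrefixList_getD (cs : List Char) (j : Nat) (hj : j ≤ cs.length) :
    (cs.foldl (fun (p : List Int) c => p ++ [2 * (p.getLast?.getD 0) + pvDigit c]) [0]).getD j 0
      = pvPrefA 0 (cs.take j) := by
  rw [pvFoldl_prefix_eq cs [0] 0 (by simp)]
  cases j with
  | zero => simp [pvPrefA]
  | succ j =>
      have : ([(0:Int)] ++ pvHl 0 cs).getD (j+1) 0 = (pvHl 0 cs).getD j 0 := by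
        simp
      rw [this, pvHl_getD cs 0 j (by omega)]

-- pref recurrence
lemma pvPref_take_succ (cs : List Char) (j : Nat) (hj : j < cs.length) :
    pvPrefA 0 (cs.take (j + 1)) = 2 * pvPrefA 0 (cs.take j) + pvDigit (cs.getD j '0') := by
  have h1 : cs.take (j + 1) = cs.take j ++ [cs.getD j '0'] := by
    simp only [List.getD]
    rw [List.take_add_one, List.getElem?_eq_getElem hj]
    simp
  rw [h1]
  simp [pvPrefA, List.foldl_append]

-- substring value at offset k from start i
def pvVal (cs : List Char) (i k : Nat) : Int :=
  pvPrefA 0 (cs.take (i + k)) - pvPrefA 0 (cs.take i) * 2 ^ k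

lemma pvVal_succ (cs : List Char) (i k : Nat) (h : i + k < cs.length) :
    pvVal cs i (k + 1) = 2 * pvVal cs i k + pvDigit (cs.getD (i + k) '0') := by
  unfold pvVal
  rw [show i + (k + 1) = (i + k) + 1 by ring, pvPref_take_succ cs (i + k) h]
  ring

-- A's inner loop adds exactly the values pvVal cs i (j - i + 1)
lemma pvInnerA (cs : List Char) (i : Nat) : ∀ (m j0 : Nat) (S : PySem.Set Int),
    i ≤ j0 → j0 + m ≤ cs.length →
    ((List.range' j0 m).foldl
      (fun (st : Int × PySem.Set Int) j =>
        let d : Int := 2 * st.1 + pvDigit (cs.getD j '0')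
        (d, st.2.add d))
      ((pvVal cs i (j0 - i)), S)).2
    = (List.range' j0 m).foldl (fun (S : PySem.Set Int) j => S.add (pvVal cs i (j - i + 1))) S := by
  intro m
  induction m with
  | zero => intro j0 S _ _; simp
  | succ m ih =>
      intro j0 S h1 h2
      rw [List.range'_succ]
      simp only [List.foldl_cons]
      have hd : 2 * pvVal cs i (j0 - i) + pvDigit (cs.getD j0 '0') = pvVal cs i (j0 - i + 1) := by
        have := pvVal_succ cs i (j0 - i) (by omega)
        rw [show i + (j0 - i) = j0 by omega] at this
        omega
      rw [hd]
      have hih := ih (j0 + 1) (S.add (pvVal cs i (j0 - i + 1))) (by omega) (by omega)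
      rw [show j0 + 1 - i = j0 - i + 1 by omega] at hih
      exact hih

-- one outer-loop step of A equals one outer-loop step of B
lemma pvOuterStep (cs : List Char) (i : Nat) (hi : i < cs.length) (S : PySem.Set Int) :
    ((List.range' i (cs.length - i)).foldl
      (fun (st : Int × PySem.Set Int) j =>
        let d : Int := 2 * st.1 + pvDigit (cs.getD j '0')
        (d, st.2.add d))
      ((0 : Int), S)).2
    = (List.range' (i + 1) (cs.length - i)).foldl
        (fun (r : PySem.Set Int) j => PySem.Set.add r
          ((cs.foldl (fun (p : List Int) c => p ++ [2 * (p.getLast?.getD 0) + pvDigit c]) [0]).getD j 0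
            - (cs.foldl (fun (p : List Int) c => p ++ [2 * (p.getLast?.getD 0) + pvDigit c]) [0]).getD i 0 * 2 ^ (j - i)))
        S := by
  have hz : pvVal cs i (i - i) = 0 := by simp [pvVal]
  have hA := pvInnerA cs i (cs.length - i) i S (le_refl i) (by omega)
  rw [hz] at hA
  rw [hA]
  -- rewrite B's added values into pvVal form
  have hB : (List.range' (i + 1) (cs.length - i)).foldl
        (fun (r : PySem.Set Int) j => PySem.Set.add r
          ((cs.foldl (fun (p : List Int) c => p ++ [2 * (p.getLast?.getD 0) + pvDigit c]) [0]).getD j 0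
            - (cs.foldl (fun (p : List Int) c => p ++ [2 * (p.getLast?.getD 0) + pvDigit c]) [0]).getD i 0 * 2 ^ (j - i)))
        S
      = (List.range' (i + 1) (cs.length - i)).foldl
        (fun (r : PySem.Set Int) j => PySem.Set.add r (pvVal cs i (j - i))) S := by
    apply PySem.List.foldl_congr_mem
    intro acc j hj
    have hj' : i + 1 ≤ j ∧ j < i + 1 + (cs.length - i) := by
      constructor
      · exact (List.mem_range'_1.mp hj).1
      · exact (List.mem_range'_1.mp hj).2
    rw [pvPrefixList_getD cs j (by omega), pvPrefixList_getD cs i (by omega)]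
    simp [pvVal, show i + (j - i) = j by omega]
  rw [hB]
  -- reindex both folds over List.range (cs.length - i)
  rw [List.range'_eq_map_range, List.range'_eq_map_range, List.foldl_map, List.foldl_map]
  apply PySem.List.foldl_congr_mem
  intro acc k _
  rw [show i + k - i + 1 = k + 1 by omega, show i + 1 + k - i = k + 1 by omega]

-- ===== VERDICT (by name: the statement is the Claim_ definition above) =====
theorem extract_binary_substrings_spec : Claim_equal_extract_binary_substrings := by
  intro s _
  unfold Spec_extract_binary_substrings extract_binary_substrings extract_binary_substrings_alt
  by_cases hg : (s.toList.any (fun c => decide (¬ (c = '0' ∨ c = '1')))) = true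
  · simp only [hg, if_true]
  · simp only [hg]
    refine congrArg some ?_
    apply PySem.List.foldl_congr_mem
    intro acc i hi
    have hi' : i < s.toList.length := List.mem_range.mp hi
    exact pvOuterStep s.toList i hi' acc
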